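-- pv_equiv track=rewrite | github.com/rajnishpanwar05/tenderradar | monitoring/scraper_health_manager.py | _normalize_source_key
-- ===== SOURCE A (Python) =====
-- _SOURCE_ALIASES = {
--     "world bank": ["World Bank", "worldbank", "wb"],
--     "ted eu": ["TED EU", "TED-EU", "ted", "tedeu"],
--     "afdb consultants": ["AfDB Consultants", "AfDB", "afdb"],
--     "afd france": ["AFD France", "AFD", "afd"],
--     "ungm": ["UNGM", "ungm"],
--     "usaid": ["USAID", "usaid"],
--     "gem bidplus": ["GeM BidPlus", "GeM", "gem"],
--     "devnet india": ["DevNet India", "DevNet", "devnet"],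
--     "cg eprocurement": ["CG eProcurement", "CG", "cg"],
--     "undp procurement": ["UNDP Procurement", "UNDP", "undp"],
--     "meghalaya mbda": ["Meghalaya MBDA", "MBDA", "meghalaya"],
--     "iucn procurement": ["IUCN Procurement", "IUCN", "iucn"],
--     "sidbi tenders": ["SIDBI Tenders", "SIDBI", "sidbi"],
--     "icfre tenders": ["ICFRE Tenders", "ICFRE", "icfre"],
--     "phfi tenders": ["PHFI Tenders", "PHFI", "phfi"],
--     "jtds jharkhand": ["JTDS Jharkhand", "JTDS", "jtds"],
--     "maharashtra tenders": ["Maharashtra Tenders", "Maharashtra", "maharashtra"],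
--     "up etenders": ["UP eTenders", "UP eTender", "UP", "up", "upetender"],
--     "taneps tanzania": ["TANEPS Tanzania", "TANEPS", "taneps"],
--     "giz india": ["GIZ India", "GIZ", "giz"],
--     "ngo box": ["NGO Box", "NGOBox", "ngobox"],
--     "welthungerhilfe": ["Welthungerhilfe", "whh"],
--     "karnataka eprocure": ["Karnataka eProcure", "Karnataka", "karnataka"],
--     "dtvp germany": ["DTVP Germany", "DTVP", "dtvp"],
--     "ilo procurement": ["ILO Procurement", "ILO", "ilo"],
--     "sam.gov": ["SAM.gov", "SAM", "sam"],
--     "european commission (ec)": ["European Commission (EC)", "European Commission", "EC", "ec"],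
--     "adb (asian dev bank)": ["ADB (Asian Dev Bank)", "ADB", "adb"],
-- }
--
-- def _normalize_source_key(source: str) -> str:
--     """
--     Collapse labels and source slugs into one lookup key so runner health and
--     DB coverage can be joined even when they use different names.
--     """
--     key = str(source or "").strip().lower()
--     if not key:
--         return ""
--     for canonical, aliases in _SOURCE_ALIASES.items():
--         alias_keys = {str(a).strip().lower() for a in aliases}
--         if key == canonical or key in alias_keys:
--             return canonical
--     return key
-- ===== SOURCE B (Python) =====
-- # Flat reverse lookup table: every lowercased alias (and each canonical key
-- # itself) maps straight to its canonical source key; one dict lookup per call.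
-- _REVERSE = {
--     'world bank': 'world bank',
--     'worldbank': 'world bank',
--     'wb': 'world bank',
--     'ted eu': 'ted eu',
--     'ted-eu': 'ted eu',
--     'ted': 'ted eu',
--     'tedeu': 'ted eu',
--     'afdb consultants': 'afdb consultants',
--     'afdb': 'afdb consultants',
--     'afd france': 'afd france',
--     'afd': 'afd france',
--     'ungm': 'ungm',
--     'usaid': 'usaid',
--     'gem bidplus': 'gem bidplus',
--     'gem': 'gem bidplus',
--     'devnet india': 'devnet india',
--     'devnet': 'devnet india',
--     'cg eprocurement': 'cg eprocurement',
--     'cg': 'cg eprocurement',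
--     'undp procurement': 'undp procurement',
--     'undp': 'undp procurement',
--     'meghalaya mbda': 'meghalaya mbda',
--     'mbda': 'meghalaya mbda',
--     'meghalaya': 'meghalaya mbda',
--     'iucn procurement': 'iucn procurement',
--     'iucn': 'iucn procurement',
--     'sidbi tenders': 'sidbi tenders',
--     'sidbi': 'sidbi tenders',
--     'icfre tenders': 'icfre tenders',
--     'icfre': 'icfre tenders',
--     'phfi tenders': 'phfi tenders',
--     'phfi': 'phfi tenders',
--     'jtds jharkhand': 'jtds jharkhand',
--     'jtds': 'jtds jharkhand',
--     'maharashtra tenders': 'maharashtra tenders',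
--     'maharashtra': 'maharashtra tenders',
--     'up etenders': 'up etenders',
--     'up etender': 'up etenders',
--     'up': 'up etenders',
--     'upetender': 'up etenders',
--     'taneps tanzania': 'taneps tanzania',
--     'taneps': 'taneps tanzania',
--     'giz india': 'giz india',
--     'giz': 'giz india',
--     'ngo box': 'ngo box',
--     'ngobox': 'ngo box',
--     'welthungerhilfe': 'welthungerhilfe',
--     'whh': 'welthungerhilfe',
--     'karnataka eprocure': 'karnataka eprocure',
--     'karnataka': 'karnataka eprocure',
--     'dtvp germany': 'dtvp germany',
--     'dtvp': 'dtvp germany',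
--     'ilo procurement': 'ilo procurement',
--     'ilo': 'ilo procurement',
--     'sam.gov': 'sam.gov',
--     'sam': 'sam.gov',
--     'european commission (ec)': 'european commission (ec)',
--     'european commission': 'european commission (ec)',
--     'ec': 'european commission (ec)',
--     'adb (asian dev bank)': 'adb (asian dev bank)',
--     'adb': 'adb (asian dev bank)',
-- }
--
--
-- def _normalize_source_key(source: str) -> str:
--     key = str(source or "").strip().lower()
--     if not key:
--         return ""
--     return _REVERSE.get(key, key)
-- ===== Notes on version B (the rewrite author's own statement) =====
-- stated objective: simpler
-- what changed: Replaces the per-call linear scan over _SOURCE_ALIASES (rebuilding each entry's lowercased alias set on every call) by a single flat reverse table alias->canonical, so each call is one dict lookup with no loop at all.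
import Mathlib
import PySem

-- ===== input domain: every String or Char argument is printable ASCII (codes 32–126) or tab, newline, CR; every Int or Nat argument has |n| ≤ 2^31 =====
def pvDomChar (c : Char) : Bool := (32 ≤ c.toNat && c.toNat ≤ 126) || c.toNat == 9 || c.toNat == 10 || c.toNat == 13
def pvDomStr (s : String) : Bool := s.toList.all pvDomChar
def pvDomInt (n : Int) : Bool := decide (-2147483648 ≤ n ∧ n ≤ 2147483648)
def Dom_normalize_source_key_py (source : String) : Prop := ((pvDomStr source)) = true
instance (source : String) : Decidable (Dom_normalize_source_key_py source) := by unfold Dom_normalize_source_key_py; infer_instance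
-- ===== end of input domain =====

-- B replaces A's per-call scan of the alias table (with a lowercased alias set
-- rebuilt for every entry) by a single flat reverse table alias→canonical, so a
-- call is one dictionary lookup instead of a loop.

-- str(a).strip().lower()
def pvNorm (a : String) : String := PySem.Str.lower (PySem.Str.strip a)

-- ===== PORT A =====
-- the module constant _SOURCE_ALIASES (dict of canonical → alias list, in source order)
def pvAliasTable : List (String × List String) :=
  [ ("world bank", ["World Bank", "worldbank", "wb"]),
    ("ted eu", ["TED EU", "TED-EU", "ted", "tedeu"]),
    ("afdb consultants", ["AfDB Consultants", "AfDB", "afdb"]),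
    ("afd france", ["AFD France", "AFD", "afd"]),
    ("ungm", ["UNGM", "ungm"]),
    ("usaid", ["USAID", "usaid"]),
    ("gem bidplus", ["GeM BidPlus", "GeM", "gem"]),
    ("devnet india", ["DevNet India", "DevNet", "devnet"]),
    ("cg eprocurement", ["CG eProcurement", "CG", "cg"]),
    ("undp procurement", ["UNDP Procurement", "UNDP", "undp"]),
    ("meghalaya mbda", ["Meghalaya MBDA", "MBDA", "meghalaya"]),
    ("iucn procurement", ["IUCN Procurement", "IUCN", "iucn"]),
    ("sidbi tenders", ["SIDBI Tenders", "SIDBI", "sidbi"]),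
    ("icfre tenders", ["ICFRE Tenders", "ICFRE", "icfre"]),
    ("phfi tenders", ["PHFI Tenders", "PHFI", "phfi"]),
    ("jtds jharkhand", ["JTDS Jharkhand", "JTDS", "jtds"]),
    ("maharashtra tenders", ["Maharashtra Tenders", "Maharashtra", "maharashtra"]),
    ("up etenders", ["UP eTenders", "UP eTender", "UP", "up", "upetender"]),
    ("taneps tanzania", ["TANEPS Tanzania", "TANEPS", "taneps"]),
    ("giz india", ["GIZ India", "GIZ", "giz"]),
    ("ngo box", ["NGO Box", "NGOBox", "ngobox"]),
    ("welthungerhilfe", ["Welthungerhilfe", "whh"]),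
    ("karnataka eprocure", ["Karnataka eProcure", "Karnataka", "karnataka"]),
    ("dtvp germany", ["DTVP Germany", "DTVP", "dtvp"]),
    ("ilo procurement", ["ILO Procurement", "ILO", "ilo"]),
    ("sam.gov", ["SAM.gov", "SAM", "sam"]),
    ("european commission (ec)", ["European Commission (EC)", "European Commission", "EC", "ec"]),
    ("adb (asian dev bank)", ["ADB (Asian Dev Bank)", "ADB", "adb"]) ]

-- A's for-loop over _SOURCE_ALIASES.items(): per entry rebuild the alias set,
-- return the canonical on a match, else fall through; after the loop return key.
def pvLoopA (key : String) : List (String × List String) → String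
  | [] => key
  | (canonical, aliases) :: rest =>
      let alias_keys : PySem.Set String := PySem.Set.ofList (aliases.map pvNorm)
      if key == canonical || PySem.Set.contains alias_keys key then canonical
      else pvLoopA key rest

def normalize_source_key_py (source : String) : String :=
  let key := pvNorm source          -- str(source or "").strip().lower(): '' stays ''
  if key == "" then "" else pvLoopA key pvAliasTable

-- ===== PORT B =====
-- Source B's module constant _REVERSE: the flat reverse table, one literal dict
def pvReverse : PySem.Dict String String := PySem.Dict.mk
  [
    ("world bank", "world bank"),
    ("worldbank", "world bank"),
    ("wb", "world bank"),
    ("ted eu", "ted eu"),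
    ("ted-eu", "ted eu"),
    ("ted", "ted eu"),
    ("tedeu", "ted eu"),
    ("afdb consultants", "afdb consultants"),
    ("afdb", "afdb consultants"),
    ("afd france", "afd france"),
    ("afd", "afd france"),
    ("ungm", "ungm"),
    ("usaid", "usaid"),
    ("gem bidplus", "gem bidplus"),
    ("gem", "gem bidplus"),
    ("devnet india", "devnet india"),
    ("devnet", "devnet india"),
    ("cg eprocurement", "cg eprocurement"),
    ("cg", "cg eprocurement"),
    ("undp procurement", "undp procurement"),
    ("undp", "undp procurement"),
    ("meghalaya mbda", "meghalaya mbda"),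
    ("mbda", "meghalaya mbda"),
    ("meghalaya", "meghalaya mbda"),
    ("iucn procurement", "iucn procurement"),
    ("iucn", "iucn procurement"),
    ("sidbi tenders", "sidbi tenders"),
    ("sidbi", "sidbi tenders"),
    ("icfre tenders", "icfre tenders"),
    ("icfre", "icfre tenders"),
    ("phfi tenders", "phfi tenders"),
    ("phfi", "phfi tenders"),
    ("jtds jharkhand", "jtds jharkhand"),
    ("jtds", "jtds jharkhand"),
    ("maharashtra tenders", "maharashtra tenders"),
    ("maharashtra", "maharashtra tenders"),
    ("up etenders", "up etenders"),
    ("up etender", "up etenders"),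
    ("up", "up etenders"),
    ("upetender", "up etenders"),
    ("taneps tanzania", "taneps tanzania"),
    ("taneps", "taneps tanzania"),
    ("giz india", "giz india"),
    ("giz", "giz india"),
    ("ngo box", "ngo box"),
    ("ngobox", "ngo box"),
    ("welthungerhilfe", "welthungerhilfe"),
    ("whh", "welthungerhilfe"),
    ("karnataka eprocure", "karnataka eprocure"),
    ("karnataka", "karnataka eprocure"),
    ("dtvp germany", "dtvp germany"),
    ("dtvp", "dtvp germany"),
    ("ilo procurement", "ilo procurement"),
    ("ilo", "ilo procurement"),
    ("sam.gov", "sam.gov"),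
    ("sam", "sam.gov"),
    ("european commission (ec)", "european commission (ec)"),
    ("european commission", "european commission (ec)"),
    ("ec", "european commission (ec)"),
    ("adb (asian dev bank)", "adb (asian dev bank)"),
    ("adb", "adb (asian dev bank)") ]

def normalize_source_key_py_alt (source : String) : String :=
  let key := pvNorm source
  if key == "" then "" else pvReverse.getD key key

-- ===== PRECONDITION & SPEC =====
def Spec_normalize_source_key_py (source : String) (out : String) : Prop := out = normalize_source_key_py_alt source
instance (source : String) (out : String) : Decidable (Spec_normalize_source_key_py source out) := by unfold Spec_normalize_source_key_py; infer_instance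

-- ===== CLAIM (what is proved, stated in full; the proofs are below) =====
def Claim_equal_normalize_source_key_py : Prop := ∀ (source : String), Dom_normalize_source_key_py source → Spec_normalize_source_key_py source (normalize_source_key_py source)

-- ===== LEMMAS AND PROOFS =====

-- the (alias key, canonical) pairs an entry of A's table contributes, canonical first
def pvPairs (t : List (String × List String)) : List (String × String) :=
  t.flatMap (fun e => (e.1, e.1) :: e.2.map (fun a => (pvNorm a, e.1)))

-- first-match lookup in a pair list
def pvFind (key : String) (ps : List (String × String)) : Option String :=
  (ps.find? (fun p => p.1 == key)).map (·.2)

theorem pvFind_cons (key k v : String) (ps : List (String × String)) :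
    pvFind key ((k, v) :: ps) = if k = key then some v else pvFind key ps := by
  by_cases h : k = key <;> simp [pvFind, h]

theorem pvFind_append (key : String) (l1 l2 : List (String × String)) :
    pvFind key (l1 ++ l2) = (pvFind key l1).or (pvFind key l2) := by
  simp only [pvFind, List.find?_append]
  cases l1.find? (fun p => p.1 == key) <;> simp

-- lookup in an entry's alias block: some canonical iff key is a normalised alias
theorem pvFind_aliasBlock (key c : String) (as : List String) :
    pvFind key (as.map (fun a => (pvNorm a, c)))
      = if key ∈ as.map pvNorm then some c else none := by
  induction as with
  | nil => simp [pvFind]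
  | cons a as ih =>
      simp only [List.map_cons, pvFind_cons, ih]
      by_cases h : pvNorm a = key
      · simp [h]
      · have h' : ¬ key = pvNorm a := fun hk => h hk.symm
        simp [h, h', List.mem_cons]

-- a setdefault-fold over a pair list looks up as: d first, else first match in ps
theorem pv_get?_setdefault_foldl (ps : List (String × String))
    (d : PySem.Dict String String) (key : String) :
    (ps.foldl (fun d p => d.setdefault p.1 p.2) d).get? key
      = (d.get? key).or (pvFind key ps) := by
  induction ps generalizing d with
  | nil => simp [pvFind]
  | cons p rest ih =>
      simp only [List.foldl_cons, ih]
      by_cases h : p.1 = key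
      · have hfind : pvFind key (p :: rest) = some p.2 := by
          simp [pvFind, h]
        rw [hfind, h, PySem.Dict.get?_setdefault_self]
        cases d.get? key <;> simp
      · have hfind : pvFind key (p :: rest) = pvFind key rest := by
          simp [pvFind, h]
        rw [hfind, PySem.Dict.get?_setdefault_of_ne d p.2 (Ne.symm h)]

-- A's loop is first-match lookup in the flat pair list, defaulting to key
theorem pv_loopA_eq_find (key : String) (t : List (String × List String)) :
    pvLoopA key t = (pvFind key (pvPairs t)).getD key := by
  induction t with
  | nil => simp [pvLoopA, pvFind, pvPairs]
  | cons e rest ih =>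
      obtain ⟨c, as⟩ := e
      have hp : pvPairs ((c, as) :: rest)
          = ((c, c) :: as.map (fun a => (pvNorm a, c))) ++ pvPairs rest := by
        simp [pvPairs]
      rw [hp, pvFind_append, pvFind_cons, pvFind_aliasBlock]
      by_cases hc : key = c
      · simp [pvLoopA, hc]
      · have hcb : ¬ c = key := fun h => hc h.symm
        by_cases hm : key ∈ as.map pvNorm
        · have hset : PySem.Set.contains (PySem.Set.ofList (as.map pvNorm)) key = true := by
            simp [PySem.Set.contains, PySem.Set.mem_ofList, hm]
          simp [pvLoopA, hcb, hm]
        · have hset : PySem.Set.contains (PySem.Set.ofList (as.map pvNorm)) key = false := by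
            simp [PySem.Set.contains, PySem.Set.mem_ofList, hm]
          simp [pvLoopA, hcb, hm, hc, ih]

set_option maxRecDepth 4000 in
set_option maxHeartbeats 2000000 in
-- B's literal reverse table is exactly the first-wins (setdefault) index of A's flat pair list
theorem pvReverse_eq_fold :
    pvReverse
      = (pvPairs pvAliasTable).foldl (fun d p => d.setdefault p.1 p.2) PySem.Dict.empty := by
  decide

-- ===== VERDICT (by name: the statement is the Claim_ definition above) =====
theorem normalize_source_key_py_spec : Claim_equal_normalize_source_key_py := by
  unfold Claim_equal_normalize_source_key_py Spec_normalize_source_key_py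
  intro source _
  unfold normalize_source_key_py normalize_source_key_py_alt
  by_cases h : pvNorm source = ""
  · simp [h]
  · simp only [show (pvNorm source == "") = false by simpa using h, Bool.false_eq_true,
      reduceIte]
    rw [pv_loopA_eq_find, PySem.Dict.getD_eq_get?_getD, pvReverse_eq_fold,
      pv_get?_setdefault_foldl]
    simp
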